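-- pv_equiv track=rewrite | github.com/k000927/BOJ | src/Python/[0-9999]/[2000-2999]/2661.py | isGoodString
-- ===== SOURCE A (Python) =====
-- def isGoodString(string):
--     string
--     for i in range(1, int(len(string) / 2) + 1):
--         substr1 = string[-2 * i : -i]
--         substr2 = string[-i:]
--         if substr1 == substr2:
--             return False
--     return True
-- ===== SOURCE B (Python) =====
-- def isGoodString(string):
--     # Z-algorithm on the reversed string: the last i chars repeat the preceding i chars
--     # exactly when the reversed string has a Z-value z[i] >= i, so one linear pass decides all i.
--     r = string[::-1]
--     n = len(r)
--     z = [0] * n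
--     l = rr = 0
--     for i in range(1, n):
--         zi = z[i]
--         if i < rr:
--             zi = min(rr - i, z[i - l])
--         while i + zi < n and r[zi] == r[i + zi]:
--             zi += 1
--         z[i] = zi
--         if i + zi > rr:
--             l, rr = i, i + zi
--     return not any(z[j] >= j for j in range(1, n // 2 + 1))
-- ===== Notes on version B (the rewrite author's own statement) =====
-- stated objective: faster
-- what changed: B replaces A's loop of per-length suffix-slice comparisons by a single linear Z-algorithm pass over the reversed string (maintaining the rightmost Z-box), then reads off whether any z[i] >= i for i up to n//2.
import Mathlib
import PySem

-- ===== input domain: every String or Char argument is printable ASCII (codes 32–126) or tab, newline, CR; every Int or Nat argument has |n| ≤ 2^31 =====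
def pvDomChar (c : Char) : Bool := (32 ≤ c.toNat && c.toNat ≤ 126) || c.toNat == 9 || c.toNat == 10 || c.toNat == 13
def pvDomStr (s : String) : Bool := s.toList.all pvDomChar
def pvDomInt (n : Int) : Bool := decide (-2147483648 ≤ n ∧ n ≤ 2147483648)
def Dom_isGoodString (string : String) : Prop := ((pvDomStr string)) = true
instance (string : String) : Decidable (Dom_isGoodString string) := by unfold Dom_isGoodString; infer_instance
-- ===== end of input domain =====

-- B replaces A's quadratic loop of suffix-slice comparisons by one linear Z-algorithm pass
-- over the reversed string (objective: faster, asymptotic).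

-- ===== PORT A =====
-- early-return for-loop of A over range(1, int(len(string)/2) + 1)
def pvGoA (s : List Char) : List Int → Bool
  | [] => true
  | i :: rest =>
    let substr1 := PySem.List.slice s (some (-2 * i)) (some (-i))
    let substr2 := PySem.List.slice s (some (-i)) none
    if substr1 = substr2 then false else pvGoA s rest

-- int(len(string)/2) is ported as Nat floor division (exact: float len/2 is exact here)
def isGoodString (string : String) : Bool :=
  let s := string.toList
  pvGoA s (PySem.List.pyRange 1 ((s.length / 2 : Nat) + 1) 1)

-- ===== PORT B =====
-- the inner 'while i + zi < n and r[zi] == r[i + zi]: zi += 1' of Source B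
def pvExtend (r : List Char) (i zi : Nat) : Nat :=
  if h : i + zi < r.length ∧ r[zi]? = r[i + zi]? then pvExtend r i (zi + 1)
  else zi
termination_by r.length - (i + zi)
decreasing_by omega

-- the 'for i in range(1, n)' of Source B, carrying the Z-array and the z-box [l, rr)
def pvZLoop (r : List Char) (z : List Nat) (l rr i : Nat) : List Nat :=
  if _h : i < r.length then
    let zi0 := z.getD i 0
    let zi1 := if i < rr then min (rr - i) (z.getD (i - l) 0) else zi0
    let zi := pvExtend r i zi1
    let z' := z.set i zi
    if i + zi > rr then pvZLoop r z' i (i + zi) (i + 1)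
    else pvZLoop r z' l rr (i + 1)
  else z
termination_by r.length - i

def isGoodString_alt (string : String) : Bool :=
  let r := string.toList.reverse
  let n := r.length
  let z := pvZLoop r (List.replicate n 0) 0 0 1
  !((List.range' 1 (n / 2)).any fun j => decide (z.getD j 0 ≥ j))

-- ===== PRECONDITION & SPEC =====
def Spec_isGoodString (string : String) (out : Bool) : Prop := out = isGoodString_alt string
instance (string : String) (out : Bool) : Decidable (Spec_isGoodString string out) := by unfold Spec_isGoodString; infer_instance

-- ===== CLAIM (what is proved, stated in full; the proofs are below) =====
def Claim_equal_isGoodString : Prop := ∀ (string : String), Dom_isGoodString string → Spec_isGoodString string (isGoodString string)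

-- ===== LEMMAS AND PROOFS =====

-- longest common prefix length: the value the Z-algorithm computes at each shift
def pvLcp : List Char → List Char → Nat
  | a :: as, b :: bs => if a = b then pvLcp as bs + 1 else 0
  | _, _ => 0

theorem pvLcp_nil_right (a : List Char) : pvLcp a [] = 0 := by
  cases a <;> rfl

theorem pvLcp_nil_left (b : List Char) : pvLcp [] b = 0 := by
  cases b <;> rfl

theorem pvLcp_cons (a b : Char) (as bs : List Char) :
    pvLcp (a :: as) (b :: bs) = if a = b then pvLcp as bs + 1 else 0 := rfl

theorem pvLcp_le_right (a b : List Char) : pvLcp a b ≤ b.length := by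
  induction a generalizing b with
  | nil => simp [pvLcp]
  | cons x as ih =>
    cases b with
    | nil => simp [pvLcp]
    | cons y bs =>
      simp only [pvLcp, List.length_cons]
      split_ifs
      · have := ih bs; omega
      · omega

theorem pvLcp_take (a b : List Char) : List.take (pvLcp a b) a = List.take (pvLcp a b) b := by
  induction a generalizing b with
  | nil => simp [pvLcp]
  | cons x as ih =>
    cases b with
    | nil => simp [pvLcp_nil_right]
    | cons y bs =>
      simp only [pvLcp]
      split_ifs with h
      · subst h; simp [ih bs]
      · simp

theorem pvLcp_split (k : Nat) (a b : List Char) (hk : k ≤ b.length)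
    (ht : List.take k a = List.take k b) :
    pvLcp a b = k + pvLcp (a.drop k) (b.drop k) := by
  induction k generalizing a b with
  | zero => simp
  | succ k ih =>
    cases b with
    | nil => simp at hk
    | cons y bs =>
      cases a with
      | nil => simp at ht
      | cons x as =>
        simp only [List.take_succ_cons, List.cons.injEq] at ht
        obtain ⟨hx, hrest⟩ := ht
        subst hx
        rw [pvLcp_cons, if_pos rfl, List.drop_succ_cons, List.drop_succ_cons,
          ih as bs (by simpa using hk) hrest]
        omega

theorem le_pvLcp_iff (k : Nat) (a b : List Char) :
    k ≤ pvLcp a b ↔ k ≤ b.length ∧ List.take k a = List.take k b := by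
  constructor
  · intro h
    refine ⟨le_trans h (pvLcp_le_right a b), ?_⟩
    have := pvLcp_take a b
    calc List.take k a = List.take k (List.take (pvLcp a b) a) := by
          rw [List.take_take, min_eq_left h]
      _ = List.take k (List.take (pvLcp a b) b) := by rw [this]
      _ = List.take k b := by rw [List.take_take, min_eq_left h]
  · rintro ⟨h1, h2⟩
    rw [pvLcp_split k a b h1 h2]
    omega

theorem take_eq_iff_getElem? (m : Nat) (a b : List Char) :
    List.take m a = List.take m b ↔ ∀ k, k < m → a[k]? = b[k]? := by
  constructor
  · intro h k hk
    have := congrArg (fun l => l[k]?) h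
    simpa [List.getElem?_take, hk] using this
  · intro h
    apply List.ext_getElem?
    intro k
    by_cases hk : k < m
    · simp [hk, h k hk]
    · simp [hk]

theorem pvExtend_eq (r : List Char) (i : Nat) (zi : Nat) :
    pvExtend r i zi = zi + pvLcp (r.drop zi) (r.drop (i + zi)) := by
  rw [pvExtend]
  split_ifs with h
  · obtain ⟨hlt, heq⟩ := h
    have hz : zi < r.length := by omega
    rw [List.drop_eq_getElem_cons hz, List.drop_eq_getElem_cons hlt]
    have hch : r[zi] = r[i + zi] := by
      have := heq
      simp [hz, hlt] at this
      exact this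
    rw [pvLcp_cons, if_pos hch]
    rw [pvExtend_eq r i (zi + 1)]
    have : i + (zi + 1) = i + zi + 1 := by omega
    rw [this]
    omega
  · rcases Decidable.not_and_iff_or_not.mp h with h1 | h2
    · have hd : r.drop (i + zi) = [] := List.drop_eq_nil_of_le (by omega)
      rw [hd, pvLcp_nil_right]
      omega
    · have hz : zi < r.length ∨ r.length ≤ zi := by omega
      rcases hz with hz | hz
      · by_cases hlt : i + zi < r.length
        · rw [List.drop_eq_getElem_cons hz, List.drop_eq_getElem_cons hlt]
          have hne : r[zi] ≠ r[i + zi] := by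
            intro hcontra
            apply h2
            simp [hz, hlt, hcontra]
          rw [pvLcp_cons, if_neg hne]
          omega
        · have hd : r.drop (i + zi) = [] := List.drop_eq_nil_of_le (by omega)
          rw [hd, pvLcp_nil_right]
          omega
      · have hd : r.drop zi = [] := List.drop_eq_nil_of_le hz
        rw [hd, pvLcp_nil_left]
        omega
termination_by r.length - (i + zi)
decreasing_by omega

-- the z-box gives a valid starting value: min(rr - i, z[i - l]) characters already match
theorem pvBoxLB (r : List Char) (l rr i w v : Nat)
    (hl : l ≤ i) (hir : i < rr)
    (hbox : List.take (rr - l) (r.drop l) = List.take (rr - l) r)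
    (hw : List.take w (r.drop (i - l)) = List.take w r)
    (hv : v = min (rr - i) w) :
    List.take v (r.drop i) = List.take v r := by
  rw [take_eq_iff_getElem?] at hbox hw ⊢
  intro k hk
  have hk1 : k < rr - i := by omega
  have hk2 : k < w := by omega
  have h1 := hbox (i - l + k) (by omega)
  have h2 := hw k hk2
  rw [List.getElem?_drop] at h1 h2 ⊢
  have e1 : l + (i - l + k) = i + k := by omega
  have e2 : i - l + k = i - l + k := rfl
  rw [e1] at h1
  rw [h1, h2]

-- the loop invariant of pvZLoop
def pvInv (r : List Char) (z : List Nat) (l rr i : Nat) : Prop :=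
  z.length = r.length ∧ l ≤ i ∧ l ≤ rr ∧ rr ≤ r.length ∧
  (∀ j, j < r.length →
      List.take (z.getD j 0) (r.drop j) = List.take (z.getD j 0) r ∧ j + z.getD j 0 ≤ r.length) ∧
  (∀ j, 1 ≤ j → j < i → z.getD j 0 = pvLcp r (r.drop j)) ∧
  List.take (rr - l) (r.drop l) = List.take (rr - l) r

theorem getD_set_self (z : List Nat) (i v : Nat) (h : i < z.length) :
    (z.set i v).getD i 0 = v := by
  simp [List.getD, h]

theorem getD_set_ne (z : List Nat) (i j v : Nat) (h : i ≠ j) :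
    (z.set i v).getD j 0 = z.getD j 0 := by
  simp [List.getD, List.getElem?_set_ne h]

theorem pvZLoop_exact (r : List Char) (fuel : Nat) :
    ∀ (z : List Nat) (l rr i : Nat), r.length - i ≤ fuel → pvInv r z l rr i →
      ∀ j, 1 ≤ j → j < r.length → (pvZLoop r z l rr i).getD j 0 = pvLcp r (r.drop j) := by
  induction fuel with
  | zero =>
    intro z l rr i hfuel hinv j hj1 hj2
    obtain ⟨hlen, hli, hlr, hrn, hvalid, hexact, hbox⟩ := hinv
    rw [pvZLoop]
    have : ¬ i < r.length := by omega
    rw [dif_neg this]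
    exact hexact j hj1 (by omega)
  | succ fuel ih =>
    intro z l rr i hfuel hinv j hj1 hj2
    obtain ⟨hlen, hli, hlr, hrn, hvalid, hexact, hbox⟩ := hinv
    rw [pvZLoop]
    by_cases hi : i < r.length
    · rw [dif_pos hi]
      simp only
      set zi1 := if i < rr then min (rr - i) (z.getD (i - l) 0) else z.getD i 0 with hzi1
      -- the start value zi1 is a valid lower bound
      have hstart : List.take zi1 (r.drop i) = List.take zi1 r ∧ i + zi1 ≤ r.length := by
        rw [hzi1]
        split_ifs with hir
        · constructor
          · exact pvBoxLB r l rr i (z.getD (i - l) 0) _ hli hir hbox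
              (hvalid (i - l) (by omega)).1 rfl
          · omega
        · exact hvalid i hi
      -- the while loop then computes the exact lcp
      have hzi : pvExtend r i zi1 = pvLcp r (r.drop i) := by
        rw [pvExtend_eq]
        have hsplit := pvLcp_split zi1 r (r.drop i)
          (by rw [List.length_drop]; omega) hstart.1.symm
        rw [hsplit, List.drop_drop]
      set zi := pvExtend r i zi1 with hzidef
      set z' := z.set i zi with hz'
      have hzval : zi = pvLcp r (r.drop i) := hzi
      have hzle : i + zi ≤ r.length := by
        have := pvLcp_le_right r (r.drop i)
        rw [List.length_drop] at this
        omega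
      have hztake : List.take zi (r.drop i) = List.take zi r := by
        rw [hzval]; exact (pvLcp_take r (r.drop i)).symm
      have hilen : i < z.length := by omega
      -- the updated array still satisfies the per-entry clauses
      have hvalid' : ∀ j', j' < r.length →
          List.take (z'.getD j' 0) (r.drop j') = List.take (z'.getD j' 0) r ∧
            j' + z'.getD j' 0 ≤ r.length := by
        intro j' hj'
        by_cases hji : j' = i
        · subst hji
          rw [hz', getD_set_self z j' zi hilen]
          exact ⟨hztake, hzle⟩
        · rw [hz', getD_set_ne z i j' zi (fun h => hji h.symm)]
          exact hvalid j' hj'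
      have hexact' : ∀ j', 1 ≤ j' → j' < i + 1 → z'.getD j' 0 = pvLcp r (r.drop j') := by
        intro j' h1 h2
        by_cases hji : j' = i
        · subst hji
          rw [hz', getD_set_self z j' zi hilen]
          exact hzval
        · rw [hz', getD_set_ne z i j' zi (fun h => hji h.symm)]
          exact hexact j' h1 (by omega)
      have hlen' : z'.length = r.length := by rw [hz', List.length_set]; exact hlen
      have hbox' : List.take (i + zi - i) (r.drop i) = List.take (i + zi - i) r := by
        have e : i + zi - i = zi := by omega
        rw [e]; exact hztake
      split_ifs with hgrow
      · exact ih z' i (i + zi) (i + 1) (by omega)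
          ⟨hlen', by omega, by omega, hzle, hvalid', hexact', hbox'⟩ j hj1 hj2
      · exact ih z' l rr (i + 1) (by omega)
          ⟨hlen', by omega, hlr, hrn, hvalid', hexact', hbox⟩ j hj1 hj2
    · rw [dif_neg hi]
      exact hexact j hj1 (by omega)

-- A's early-return loop returns True iff no block comparison succeeds
theorem pvGoA_iff (s : List Char) (l : List Int) :
    pvGoA s l = true ↔ ∀ i ∈ l,
      ¬ (PySem.List.slice s (some (-(2 * i))) (some (-i)) = PySem.List.slice s (some (-i)) none) := by
  induction l with
  | nil => simp [pvGoA]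
  | cons i rest ih =>
    simp only [pvGoA, neg_mul, List.mem_cons]
    split_ifs with h
    · simp only [false_iff]
      intro hall
      exact hall i (Or.inl rfl) h
    · rw [ih]
      constructor
      · intro hall j hj
        rcases hj with hj | hj
        · subst hj; exact h
        · exact hall j hj
      · intro hall j hj; exact hall j (Or.inr hj)

-- A's two suffix slices on s agree iff the corresponding prefixes of s.reverse agree
theorem slice_eq_iff_take_eq (s : List Char) (j : Nat) (h1 : 1 ≤ j) (h2 : 2 * j ≤ s.length) :
    (PySem.List.slice s (some (-(2 * (j : Int)))) (some (-(j : Int))) =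
      PySem.List.slice s (some (-(j : Int))) none) ↔
    (List.take j s.reverse = List.take j (List.drop j s.reverse)) := by
  have hA : PySem.List.slice s (some (-(2 * (j : Int)))) (some (-(j : Int)))
      = List.take j (List.drop (s.length - 2 * j) s) := by
    have e : (-(2 * (j : Int))) = -((2 * j : Nat) : Int) := by push_cast; ring
    rw [e]
    simp only [PySem.List.slice, PySem.List.clampIdx_neg_natCast _ _ (by omega : 0 < 2 * j),
      PySem.List.clampIdx_neg_natCast _ _ (by omega : 0 < j)]
    congr 1
    omega
  have hB : PySem.List.slice s (some (-(j : Int))) none = List.drop (s.length - j) s :=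
    PySem.List.slice_from_neg_natCast s j (by omega)
  rw [hA, hB, List.drop_reverse, List.take_reverse (xs := s),
    List.take_reverse (xs := List.take (s.length - j) s), List.length_take, List.reverse_inj]
  have e2 : min (s.length - j) s.length - j = s.length - 2 * j := by omega
  rw [e2, List.drop_take]
  have e3 : s.length - j - (s.length - 2 * j) = j := by omega
  rw [e3]
  exact eq_comm

-- ===== VERDICT (by name: the statement is the Claim_ definition above) =====
theorem isGoodString_spec : Claim_equal_isGoodString := by
  intro string _
  unfold Spec_isGoodString isGoodString isGoodString_alt
  simp only
  set s := string.toList with hs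
  set r := s.reverse with hr
  have hn : r.length = s.length := by rw [hr, List.length_reverse]
  -- exactness of the Z-array B computes
  have hexact : ∀ j, 1 ≤ j → j < r.length →
      (pvZLoop r (List.replicate r.length 0) 0 0 1).getD j 0 = pvLcp r (r.drop j) := by
    apply pvZLoop_exact r r.length _ _ _ _ (by omega)
    refine ⟨by simp, by omega, le_refl 0, by omega, ?_, by omega, by simp⟩
    intro j hj
    simp
    omega
  rw [Bool.eq_iff_iff, pvGoA_iff]
  simp only [Bool.not_eq_eq_eq_not, Bool.not_true, List.any_eq_false, List.mem_range'_1, decide_eq_true_eq]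
  constructor
  · intro hall j hj
    obtain ⟨hj1, hj2⟩ := hj
    have hj2' : j ≤ r.length / 2 := by omega
    have hjn : j < r.length := by omega
    intro hge
    have hzj := hexact j hj1 hjn
    rw [hzj] at hge
    rw [ge_iff_le, le_pvLcp_iff] at hge
    have htk : List.take j r = List.take j (r.drop j) := hge.2
    have hmem : (j : Int) ∈ PySem.List.pyRange 1 ((s.length / 2 : Nat) + 1) 1 := by
      rw [PySem.List.mem_pyRange_one]
      constructor
      · exact_mod_cast hj1
      · push_cast; omega
    exact hall (j : Int) hmem
      ((slice_eq_iff_take_eq s j hj1 (by omega)).mpr (by rw [← hr]; exact htk))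
  · intro hall i hmem
    rw [PySem.List.mem_pyRange_one] at hmem
    obtain ⟨hi1, hi2⟩ := hmem
    set j := i.toNat with hjdef
    have hji : i = (j : Int) := by omega
    have h1 : 1 ≤ j := by omega
    have h2 : j ≤ s.length / 2 := by omega
    intro hslice
    have htk : List.take j r = List.take j (r.drop j) := by
      rw [hr]
      exact (slice_eq_iff_take_eq s j h1 (by omega)).mp (by rw [← hji]; exact hslice)
    have hjn : j < r.length := by omega
    have := hall j ⟨h1, by omega⟩
    apply this
    rw [hexact j h1 hjn, ge_iff_le, le_pvLcp_iff]
    exact ⟨by rw [List.length_drop]; omega, htk⟩
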